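-- pv_equiv track=rewrite | github.com/humairaambreen/kecarchives | apps/api/app/api/ai.py | _fallback_image_prompt
-- ===== SOURCE A (Python) =====
-- def _fallback_image_prompt(text: str) -> str:
--     lower = text.lower()
--     if "fresher"   in lower: return "college freshers welcome party, excited students, colorful stage decorations, auditorium, warm lighting"
--     if "farewell"  in lower: return "college farewell ceremony, emotional graduates, flowers and streamers, auditorium, warm lighting"
--     if "holi"      in lower: return "students celebrating holi with colorful powder, college campus, joyful atmosphere, vibrant colors"
--     if "convocation" in lower or "graduation" in lower: return "graduation ceremony, students in caps and gowns, college auditorium, celebratory atmosphere"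
--     if any(w in lower for w in ["sport", "cricket", "football"]): return "college sports day, students competing on field, energetic atmosphere, natural lighting"
--     if any(w in lower for w in ["hackathon", "tech", "coding"]):  return "students at hackathon, laptops and whiteboards, modern lab, collaborative energy"
--     if any(w in lower for w in ["cultural", "fest", "dance", "music"]): return "college cultural fest, students performing on stage, colorful lights, enthusiastic crowd"
--     return "engineering college students, campus celebration, professional photography, vibrant atmosphere"
-- ===== SOURCE B (Python) =====
-- _KEYWORDS = {
--     "fresher": 0, "farewell": 1, "holi": 2,
--     "convocation": 3, "graduation": 3,
--     "sport": 4, "cricket": 4, "football": 4,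
--     "hackathon": 5, "tech": 5, "coding": 5,
--     "cultural": 6, "fest": 6, "dance": 6, "music": 6,
-- }
--
-- _PROMPTS = [
--     "college freshers welcome party, excited students, colorful stage decorations, auditorium, warm lighting",
--     "college farewell ceremony, emotional graduates, flowers and streamers, auditorium, warm lighting",
--     "students celebrating holi with colorful powder, college campus, joyful atmosphere, vibrant colors",
--     "graduation ceremony, students in caps and gowns, college auditorium, celebratory atmosphere",
--     "college sports day, students competing on field, energetic atmosphere, natural lighting",
--     "students at hackathon, laptops and whiteboards, modern lab, collaborative energy",
--     "college cultural fest, students performing on stage, colorful lights, enthusiastic crowd",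
--     "engineering college students, campus celebration, professional photography, vibrant atmosphere",
-- ]
--
--
-- def _fallback_image_prompt(text: str) -> str:
--     # Single left-to-right scan over the lowered text: at each position, note any
--     # keyword starting there and keep the minimum category priority seen.
--     lower = text.lower()
--     best = len(_PROMPTS) - 1
--     for i in range(len(lower)):
--         for kw, pri in _KEYWORDS.items():
--             if pri < best and lower.startswith(kw, i):
--                 best = pri
--     return _PROMPTS[best]
-- ===== Notes on version B (the rewrite author's own statement) =====
-- stated objective: alternative
-- what changed: Replaces the ordered if-chain of substring tests with a single left-to-right positional scan of the lowered text that, at each index, matches keywords from a keyword-to-priority table and keeps the minimum priority seen, indexing a prompt array at the end.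
import Mathlib
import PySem

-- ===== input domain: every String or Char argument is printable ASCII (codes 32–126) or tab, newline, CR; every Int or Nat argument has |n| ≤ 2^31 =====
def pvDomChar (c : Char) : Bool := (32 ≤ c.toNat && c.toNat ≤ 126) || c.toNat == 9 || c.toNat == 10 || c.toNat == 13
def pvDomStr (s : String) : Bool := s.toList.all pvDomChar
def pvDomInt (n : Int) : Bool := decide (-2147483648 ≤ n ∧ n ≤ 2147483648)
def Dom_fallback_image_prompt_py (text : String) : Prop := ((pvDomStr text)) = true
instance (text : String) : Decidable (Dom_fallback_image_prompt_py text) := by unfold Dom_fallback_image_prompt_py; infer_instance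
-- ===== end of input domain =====

-- B replaces A's ordered if-chain of substring tests by one positional scan of the
-- lowered text keeping the minimum matched category priority (objective: alternative).

-- ===== PORT A =====
def fallback_image_prompt_py (text : String) : String :=
  let lower := PySem.Str.lower text
  if PySem.Str.isIn "fresher" lower then "college freshers welcome party, excited students, colorful stage decorations, auditorium, warm lighting"
  else if PySem.Str.isIn "farewell" lower then "college farewell ceremony, emotional graduates, flowers and streamers, auditorium, warm lighting"
  else if PySem.Str.isIn "holi" lower then "students celebrating holi with colorful powder, college campus, joyful atmosphere, vibrant colors"
  else if PySem.Str.isIn "convocation" lower || PySem.Str.isIn "graduation" lower then "graduation ceremony, students in caps and gowns, college auditorium, celebratory atmosphere"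
  else if ["sport", "cricket", "football"].any (fun w => PySem.Str.isIn w lower) then "college sports day, students competing on field, energetic atmosphere, natural lighting"
  else if ["hackathon", "tech", "coding"].any (fun w => PySem.Str.isIn w lower) then "students at hackathon, laptops and whiteboards, modern lab, collaborative energy"
  else if ["cultural", "fest", "dance", "music"].any (fun w => PySem.Str.isIn w lower) then "college cultural fest, students performing on stage, colorful lights, enthusiastic crowd"
  else "engineering college students, campus celebration, professional photography, vibrant atmosphere"

-- ===== PORT B =====
-- keyword -> category priority (Python dict _KEYWORDS, insertion order)
def pvKeywords : List (List Char × Nat) :=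
  [("fresher".toList, 0), ("farewell".toList, 1), ("holi".toList, 2),
   ("convocation".toList, 3), ("graduation".toList, 3),
   ("sport".toList, 4), ("cricket".toList, 4), ("football".toList, 4),
   ("hackathon".toList, 5), ("tech".toList, 5), ("coding".toList, 5),
   ("cultural".toList, 6), ("fest".toList, 6), ("dance".toList, 6), ("music".toList, 6)]

def pvPrompts : List String :=
  [ "college freshers welcome party, excited students, colorful stage decorations, auditorium, warm lighting",
    "college farewell ceremony, emotional graduates, flowers and streamers, auditorium, warm lighting",
    "students celebrating holi with colorful powder, college campus, joyful atmosphere, vibrant colors",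
    "graduation ceremony, students in caps and gowns, college auditorium, celebratory atmosphere",
    "college sports day, students competing on field, energetic atmosphere, natural lighting",
    "students at hackathon, laptops and whiteboards, modern lab, collaborative energy",
    "college cultural fest, students performing on stage, colorful lights, enthusiastic crowd",
    "engineering college students, campus celebration, professional photography, vibrant atmosphere" ]

-- the inner keyword loop at position i: 'lower.startswith(kw, i)' with 0 ≤ i ≤ len is
-- exactly 'kw is a prefix of the code points from i' (ported by hand, exact on that range)
def pvStep (lower : List Char) (best : Nat) (i : Nat) : Nat :=
  pvKeywords.foldl
    (fun best p => if p.2 < best && PySem.Chars.startswith (lower.drop i) p.1 then p.2 else best)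
    best

-- the outer position loop: 'for i in range(len(lower))' with accumulator best
def pvScan (lower : List Char) : Nat :=
  (List.range lower.length).foldl (pvStep lower) (pvPrompts.length - 1)

def fallback_image_prompt_py_alt (text : String) : String :=
  pvPrompts.getD (pvScan (PySem.Str.lower text).toList) ""   -- _PROMPTS[best]; best ≤ 7 always, so in range

-- ===== PRECONDITION & SPEC =====
def Spec_fallback_image_prompt_py (text : String) (out : String) : Prop := out = fallback_image_prompt_py_alt text
instance (text : String) (out : String) : Decidable (Spec_fallback_image_prompt_py text out) := by unfold Spec_fallback_image_prompt_py; infer_instance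

-- ===== CLAIM (what is proved, stated in full; the proofs are below) =====
def Claim_equal_fallback_image_prompt_py : Prop := ∀ (text : String), Dom_fallback_image_prompt_py text → Spec_fallback_image_prompt_py text (fallback_image_prompt_py text)

-- ===== LEMMAS AND PROOFS =====

-- 'matched so far up to position n' for one keyword entry, and the min over the table
def pvW (lw : List Char) (n : Nat) (p : List Char × Nat) : Nat :=
  if (List.range n).any (fun i => PySem.Chars.startswith (lw.drop i) p.1) then p.2 else 7

def pvF (lw : List Char) (n : Nat) : Nat :=
  pvKeywords.foldl (fun a p => min a (pvW lw n p)) 7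

def pvG (lw : List Char) (i : Nat) : Nat :=
  pvKeywords.foldl
    (fun a p => min a (if PySem.Chars.startswith (lw.drop i) p.1 then p.2 else 7)) 7

theorem pv_kw_le : ∀ p ∈ pvKeywords, p.2 ≤ 7 := by decide

theorem pv_kw_ne : ∀ p ∈ pvKeywords, p.1 ≠ [] := by decide

-- the guarded update equals a min update, for accumulators ≤ 7
theorem pv_inner_eq_min (q : List Char → Bool) :
    ∀ (ps : List (List Char × Nat)) (b : Nat), (∀ p ∈ ps, p.2 ≤ 7) → b ≤ 7 →
      ps.foldl (fun b p => if p.2 < b && q p.1 then p.2 else b) b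
        = ps.foldl (fun b p => min b (if q p.1 then p.2 else 7)) b := by
  intro ps
  induction ps with
  | nil => intro b _ _; rfl
  | cons p ps ih =>
    intro b hps hb
    have hp2 : p.2 ≤ 7 := hps p (List.mem_cons_self ..)
    simp only [List.foldl_cons]
    have hacc : (if p.2 < b && q p.1 then p.2 else b) = min b (if q p.1 then p.2 else 7) := by
      cases hq : q p.1
      · simp only [Bool.and_false, Bool.false_eq_true, if_false]
        exact (Nat.min_eq_left hb).symm
      · simp only [Bool.and_true, decide_eq_true_eq, if_true]
        by_cases h1 : p.2 < b
        · rw [if_pos h1, Nat.min_eq_right (by omega)]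
        · rw [if_neg h1, Nat.min_eq_left (by omega)]
    rw [hacc]
    exact ih _ (fun r hr => hps r (List.mem_cons_of_mem _ hr)) (by omega)

-- fold of min updates splits over a min initial accumulator
theorem pv_foldl_min_init (f : (List Char × Nat) → Nat) :
    ∀ (ps : List (List Char × Nat)) (b c : Nat),
      ps.foldl (fun a p => min a (f p)) (min b c)
        = min b (ps.foldl (fun a p => min a (f p)) c) := by
  intro ps
  induction ps with
  | nil => intro b c; rfl
  | cons p ps ih =>
    intro b c
    simp only [List.foldl_cons]
    rw [show min (min b c) (f p) = min b (min c (f p)) by omega]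
    exact ih b (min c (f p))

-- fold of min of pointwise mins splits into two folds
theorem pv_foldl_min_pair (f g : (List Char × Nat) → Nat) :
    ∀ (ps : List (List Char × Nat)) (b c : Nat),
      ps.foldl (fun a p => min a (min (f p) (g p))) (min b c)
        = min (ps.foldl (fun a p => min a (f p)) b) (ps.foldl (fun a p => min a (g p)) c) := by
  intro ps
  induction ps with
  | nil => intro b c; rfl
  | cons p ps ih =>
    intro b c
    simp only [List.foldl_cons]
    rw [show min (min b c) (min (f p) (g p)) = min (min b (f p)) (min c (g p)) by omega]
    exact ih (min b (f p)) (min c (g p))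

theorem pv_foldl_min_le (f : (List Char × Nat) → Nat) :
    ∀ (ps : List (List Char × Nat)) (b : Nat), ps.foldl (fun a p => min a (f p)) b ≤ b := by
  intro ps
  induction ps with
  | nil => intro b; exact le_rfl
  | cons p ps ih => intro b; exact le_trans (ih (min b (f p))) (by omega)

theorem pvF_le (lw : List Char) (n : Nat) : pvF lw n ≤ 7 := pv_foldl_min_le _ _ 7

theorem pv_step_eq (lw : List Char) (i : Nat) (c : Nat) (hc : c ≤ 7) :
    pvStep lw c i = min c (pvG lw i) := by
  unfold pvStep pvG
  rw [pv_inner_eq_min _ _ _ pv_kw_le hc]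
  have h := pv_foldl_min_init
      (fun p => if PySem.Chars.startswith (lw.drop i) p.1 then p.2 else 7) pvKeywords c 7
  rw [show min c 7 = c by omega] at h
  exact h

theorem pvW_succ (lw : List Char) (n : Nat) (p : List Char × Nat) (hp : p.2 ≤ 7) :
    pvW lw (n + 1) p
      = min (pvW lw n p) (if PySem.Chars.startswith (lw.drop n) p.1 then p.2 else 7) := by
  unfold pvW
  rw [List.range_succ, List.any_append, List.any_cons, List.any_nil, Bool.or_false]
  cases h1 : (List.range n).any (fun i => PySem.Chars.startswith (lw.drop i) p.1) <;>
    cases h2 : PySem.Chars.startswith (lw.drop n) p.1 <;> simp <;> omega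

theorem pvF_succ (lw : List Char) (n : Nat) :
    pvF lw (n + 1) = min (pvF lw n) (pvG lw n) := by
  unfold pvF
  have hcong : List.foldl (fun a p => min a (pvW lw (n + 1) p)) 7 pvKeywords
      = List.foldl (fun a p => min a (min (pvW lw n p)
          (if PySem.Chars.startswith (lw.drop n) p.1 then p.2 else 7))) 7 pvKeywords :=
    PySem.List.foldl_congr_mem pvKeywords _ _ 7 (fun acc p hp => by rw [pvW_succ lw n p (pv_kw_le p hp)])
  rw [hcong]
  have := pv_foldl_min_pair (fun p => pvW lw n p)
      (fun p => if PySem.Chars.startswith (lw.drop n) p.1 then p.2 else 7) pvKeywords 7 7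
  simpa using this

theorem pv_outer (lw : List Char) :
    ∀ (n : Nat) (b : Nat), b ≤ 7 →
      (List.range n).foldl (pvStep lw) b = min b (pvF lw n) := by
  intro n
  induction n with
  | zero =>
    intro b hb
    have h0 : pvF lw 0 = 7 := by
      unfold pvF pvW
      simp only [List.range_zero, List.any_nil, if_neg Bool.false_ne_true]
      decide
    simp [h0]; omega
  | succ n ih =>
    intro b hb
    rw [List.range_succ, List.foldl_append, List.foldl_cons, List.foldl_nil, ih b hb]
    have hc : min b (pvF lw n) ≤ 7 := le_trans (min_le_right _ _) (pvF_le lw n)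
    rw [pv_step_eq lw n _ hc, pvF_succ lw n]
    omega

-- a keyword occurs at some scanned position iff it is a substring (keywords are nonempty)
theorem pv_any_eq_isIn (lw kw : List Char) (h : kw ≠ []) :
    (List.range lw.length).any (fun i => PySem.Chars.startswith (lw.drop i) kw)
      = PySem.Chars.isIn kw lw := by
  by_cases hin : PySem.Chars.isIn kw lw = true
  · rw [hin, List.any_eq_true]
    obtain ⟨j, hj⟩ := (PySem.Chars.exists_prefix_drop_iff_isIn kw lw).2 hin
    have hjlt : j < lw.length := by
      by_contra hge
      rw [List.drop_eq_nil_of_le (Nat.le_of_not_lt hge)] at hj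
      exact h (List.prefix_nil.mp hj)
    exact ⟨j, List.mem_range.2 hjlt, (PySem.Chars.startswith_iff _ _).2 hj⟩
  · rw [Bool.not_eq_true] at hin
    rw [hin, List.any_eq_false]
    intro i _
    simp only [Bool.not_eq_true]
    by_contra hst
    rw [Bool.not_eq_false] at hst
    have : PySem.Chars.isIn kw lw = true :=
      (PySem.Chars.exists_prefix_drop_iff_isIn kw lw).1 ⟨i, (PySem.Chars.startswith_iff _ _).1 hst⟩
    rw [hin] at this
    exact Bool.false_ne_true this

-- the scan's minimum equals the first-match rule index
theorem pvF_eq_chain (lw : List Char) :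
    pvF lw lw.length =
      (if PySem.Chars.isIn "fresher".toList lw then 0
       else if PySem.Chars.isIn "farewell".toList lw then 1
       else if PySem.Chars.isIn "holi".toList lw then 2
       else if PySem.Chars.isIn "convocation".toList lw || PySem.Chars.isIn "graduation".toList lw then 3
       else if PySem.Chars.isIn "sport".toList lw || PySem.Chars.isIn "cricket".toList lw || PySem.Chars.isIn "football".toList lw then 4
       else if PySem.Chars.isIn "hackathon".toList lw || PySem.Chars.isIn "tech".toList lw || PySem.Chars.isIn "coding".toList lw then 5
       else if PySem.Chars.isIn "cultural".toList lw || PySem.Chars.isIn "fest".toList lw || PySem.Chars.isIn "dance".toList lw || PySem.Chars.isIn "music".toList lw then 6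
       else 7) := by
  unfold pvF
  have hcong : List.foldl (fun a p => min a (pvW lw lw.length p)) 7 pvKeywords
      = List.foldl (fun a p => min a (if PySem.Chars.isIn p.1 lw then p.2 else 7)) 7 pvKeywords :=
    PySem.List.foldl_congr_mem pvKeywords _ _ 7 (fun acc p hp => by
      unfold pvW
      rw [pv_any_eq_isIn lw p.1 (pv_kw_ne p hp)])
  rw [hcong]
  simp only [pvKeywords, List.foldl_cons, List.foldl_nil]
  generalize (PySem.Chars.isIn "fresher".toList lw) = m0
  generalize (PySem.Chars.isIn "farewell".toList lw) = m1
  generalize (PySem.Chars.isIn "holi".toList lw) = m2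
  generalize (PySem.Chars.isIn "convocation".toList lw) = m3
  generalize (PySem.Chars.isIn "graduation".toList lw) = m4
  generalize (PySem.Chars.isIn "sport".toList lw) = m5
  generalize (PySem.Chars.isIn "cricket".toList lw) = m6
  generalize (PySem.Chars.isIn "football".toList lw) = m7
  generalize (PySem.Chars.isIn "hackathon".toList lw) = m8
  generalize (PySem.Chars.isIn "tech".toList lw) = m9
  generalize (PySem.Chars.isIn "coding".toList lw) = m10
  generalize (PySem.Chars.isIn "cultural".toList lw) = m11
  generalize (PySem.Chars.isIn "fest".toList lw) = m12
  generalize (PySem.Chars.isIn "dance".toList lw) = m13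
  generalize (PySem.Chars.isIn "music".toList lw) = m14
  revert m0 m1 m2 m3 m4 m5 m6 m7 m8 m9 m10 m11 m12 m13 m14
  decide

-- ===== VERDICT (by name: the statement is the Claim_ definition above) =====
theorem fallback_image_prompt_py_spec : Claim_equal_fallback_image_prompt_py := by
  intro text _
  show fallback_image_prompt_py text = fallback_image_prompt_py_alt text
  unfold fallback_image_prompt_py fallback_image_prompt_py_alt pvScan
  rw [pv_outer _ _ _ (by decide)]
  rw [show (pvPrompts.length - 1 : Nat) = 7 from rfl]
  rw [Nat.min_eq_right (pvF_le _ _), pvF_eq_chain]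
  simp only [List.any_cons, List.any_nil, Bool.or_false, PySem.Str.isIn_eq]
  generalize (PySem.Chars.isIn "fresher".toList (PySem.Str.lower text).toList) = m0
  generalize (PySem.Chars.isIn "farewell".toList (PySem.Str.lower text).toList) = m1
  generalize (PySem.Chars.isIn "holi".toList (PySem.Str.lower text).toList) = m2
  generalize (PySem.Chars.isIn "convocation".toList (PySem.Str.lower text).toList) = m3
  generalize (PySem.Chars.isIn "graduation".toList (PySem.Str.lower text).toList) = m4
  generalize (PySem.Chars.isIn "sport".toList (PySem.Str.lower text).toList) = m5
  generalize (PySem.Chars.isIn "cricket".toList (PySem.Str.lower text).toList) = m6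
  generalize (PySem.Chars.isIn "football".toList (PySem.Str.lower text).toList) = m7
  generalize (PySem.Chars.isIn "hackathon".toList (PySem.Str.lower text).toList) = m8
  generalize (PySem.Chars.isIn "tech".toList (PySem.Str.lower text).toList) = m9
  generalize (PySem.Chars.isIn "coding".toList (PySem.Str.lower text).toList) = m10
  generalize (PySem.Chars.isIn "cultural".toList (PySem.Str.lower text).toList) = m11
  generalize (PySem.Chars.isIn "fest".toList (PySem.Str.lower text).toList) = m12
  generalize (PySem.Chars.isIn "dance".toList (PySem.Str.lower text).toList) = m13
  generalize (PySem.Chars.isIn "music".toList (PySem.Str.lower text).toList) = m14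
  revert m0 m1 m2 m3 m4 m5 m6 m7 m8 m9 m10 m11 m12 m13 m14
  decide
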